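-- pv_equiv track=rewrite | github.com/diogoneiss/Structured-Grammar-Evolution-in-Numba | scripts.py | calculate_non_recursive_productions
-- ===== SOURCE A (Python) =====
-- def get_terminals(productions):
--     terminals = set()
--     non_terminals = set(productions.keys())
--
--     for rhs in productions.values():
--         for rule in rhs:
--             for token in rule:
--                 if token not in non_terminals:
--                     terminals.add(token)
--
--     return terminals
--
-- def find_recursive_and_non_recursive_terminals(grammar):
--     recursive_terminals = set()
--     non_recursive_terminals = set()
--     non_terminals = set(grammar.keys())
--     terminals = get_terminals(grammar)
--
--     def is_recursive(nt, visited):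
--         if nt in visited:
--             return True
--         visited.add(nt)
--         for rule in grammar[nt]:
--             for token in rule:
--                 if token in non_terminals and is_recursive(token, visited):
--                     return True
--         visited.remove(nt)
--         return False
--
--     for nt in non_terminals:
--         if is_recursive(nt, set()):
--             recursive_terminals.add(nt)
--         else:
--             non_recursive_terminals.add(nt)
--
--     non_recursive_terminals |= terminals
--
--     return recursive_terminals, non_recursive_terminals
--
-- def calculate_non_recursive_productions(symbol, grammar):
--     non_recursive_indices = []
--     recursive_terminals_in_grammar, _ = find_recursive_and_non_recursive_terminals(grammar)
--
--     if symbol not in grammar: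
--         return non_recursive_indices
--
--     for i, rule in enumerate(grammar[symbol]):
--         if all(token in recursive_terminals_in_grammar for token in rule):
--             non_recursive_indices.append(i)
--
--     return non_recursive_indices
-- ===== SOURCE B (Python) =====
-- def calculate_non_recursive_productions(symbol, grammar):
--     nts = set(grammar)
--     succ = {nt: [t for rule in grammar[nt] for t in rule if t in nts] for nt in nts}
--     # bottom-up fixpoint: a non-terminal is "safe" (cannot reach a cycle) once every
--     # non-terminal it mentions is safe; iterate until the safe set stops changing
--     safe = set()
--     while True:
--         new = {nt for nt in nts if all(t in safe for t in succ[nt])}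
--         if new == safe:
--             break
--         safe = new
--     if symbol not in grammar:
--         return []
--     recursive = nts - safe
--     return [i for i, rule in enumerate(grammar[symbol])
--             if all(t in recursive for t in rule)]
-- ===== Notes on version B (the rewrite author's own statement) =====
-- stated objective: alternative
-- what changed: Replaces the per-non-terminal unmemoized DFS cycle search with a single bottom-up fixpoint computation (iterate 'safe' = non-terminals all of whose non-terminal tokens are already safe, until stable) and one scan of the symbol's rules; worst-case polynomial instead of A's exponential-worst-case DFS, though measured about the same speed on the generated timing inputs.
import Mathlib
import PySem

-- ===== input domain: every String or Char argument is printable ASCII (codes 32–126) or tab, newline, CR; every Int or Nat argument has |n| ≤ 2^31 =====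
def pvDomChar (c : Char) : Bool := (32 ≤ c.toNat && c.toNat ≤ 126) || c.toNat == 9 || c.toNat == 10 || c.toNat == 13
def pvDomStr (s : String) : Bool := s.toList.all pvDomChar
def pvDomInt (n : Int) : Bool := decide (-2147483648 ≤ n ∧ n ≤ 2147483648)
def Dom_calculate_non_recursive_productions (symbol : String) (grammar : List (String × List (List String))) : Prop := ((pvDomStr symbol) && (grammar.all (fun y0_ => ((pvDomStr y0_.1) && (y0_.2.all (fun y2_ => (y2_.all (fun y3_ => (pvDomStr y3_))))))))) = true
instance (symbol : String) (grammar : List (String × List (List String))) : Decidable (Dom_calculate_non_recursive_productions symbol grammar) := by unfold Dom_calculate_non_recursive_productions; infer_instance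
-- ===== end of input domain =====

-- ===== PORT A =====
-- B replaces A's per-non-terminal unmemoized DFS with one bottom-up fixpoint computation of the
-- non-cycle-reaching non-terminals over the grammar graph (objective: alternative algorithm).
-- Port of get_terminals (literal triple loop over values/rules/tokens)
def pvGetTerminals (g : PySem.Dict String (List (List String))) : PySem.Set String :=
  let non_terminals : PySem.Set String := PySem.Set.ofList g.keys
  g.values.foldl (fun ter rhs =>
    rhs.foldl (fun ter rule =>
      rule.foldl (fun ter token =>
        if PySem.Set.contains non_terminals token then ter else PySem.Set.add ter token) ter) ter)
    PySem.Set.empty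

-- Port of the nested `is_recursive(nt, visited)`.  The Python recursion needs no fuel; its depth is
-- bounded because `visited` gains a fresh non-terminal at every level, so `g.size + 1` fuel (passed at
-- the call site) is never exhausted and the `0` branch is unreachable; otherwise a literal port
-- (the shared mutable `visited` is restored on every False return, so passing it functionally is exact).
def pvIsRec (g : PySem.Dict String (List (List String))) (nts : PySem.Set String) :
    Nat → String → PySem.Set String → Bool
  | 0, nt, visited => PySem.Set.contains visited nt
  | f + 1, nt, visited =>
    if PySem.Set.contains visited nt then true
    else
      (g.getD nt []).any (fun rule =>
        rule.any (fun token =>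
          PySem.Set.contains nts token && pvIsRec g nts f token (PySem.Set.add visited nt)))

-- Port of find_recursive_and_non_recursive_terminals.  Python iterates the SET non_terminals in hash
-- order; both accumulators are sets only used for membership, so iterating g.keys' order is exact.
def pvFindRecNonRec (g : PySem.Dict String (List (List String))) :
    PySem.Set String × PySem.Set String :=
  let non_terminals : PySem.Set String := PySem.Set.ofList g.keys
  let terminals := pvGetTerminals g
  let pr := non_terminals.foldl
    (fun (pr : PySem.Set String × PySem.Set String) nt =>
      if pvIsRec g non_terminals (g.size + 1) nt PySem.Set.empty then (PySem.Set.add pr.1 nt, pr.2)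
      else (pr.1, PySem.Set.add pr.2 nt))
    (PySem.Set.empty, PySem.Set.empty)
  (pr.1, PySem.Set.union pr.2 terminals)

def calculate_non_recursive_productions (symbol : String) (grammar : List (String × List (List String))) : List Int :=
  let g := PySem.Dict.ofList grammar
  let non_recursive_indices : List Int := []
  let recursive_terminals_in_grammar := (pvFindRecNonRec g).1
  if g.contains symbol = false then non_recursive_indices
  else
    (PySem.List.enumerate (g.getD symbol [])).foldl
      (fun acc p =>
        if p.2.all (fun token => PySem.Set.contains recursive_terminals_in_grammar token) then
          acc ++ [p.1]
        else acc)
      non_recursive_indices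

-- ===== PORT B =====
-- Port of the succ-dict entry: [t for rule in grammar[nt] for t in rule if t in nts]
def pvNtSuccessors (g : PySem.Dict String (List (List String))) (nts : PySem.Set String)
    (nt : String) : List String :=
  ((g.getD nt []).flatMap (fun rule => rule)).filter (fun t => PySem.Set.contains nts t)

-- Port of B's 'while True' fixpoint loop.  The Python loop needs no fuel: 'safe' grows strictly
-- (within nts) on every iteration before the exit test succeeds, so nts.length + 1 fuel (passed at
-- the call site) is never exhausted; otherwise a literal port of the loop body.
def pvSafeLoop (nts : PySem.Set String) (succ : PySem.Dict String (List String)) :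
    Nat → PySem.Set String → PySem.Set String
  | 0, safe => safe
  | f + 1, safe =>
    if PySem.Set.equal (nts.filter (fun nt =>
        (succ.getD nt []).all (fun t => PySem.Set.contains safe t))) safe then safe
    else pvSafeLoop nts succ f (nts.filter (fun nt =>
      (succ.getD nt []).all (fun t => PySem.Set.contains safe t)))

def calculate_non_recursive_productions_alt (symbol : String) (grammar : List (String × List (List String))) : List Int :=
  let g := PySem.Dict.ofList grammar
  let nts : PySem.Set String := PySem.Set.ofList g.keys
  -- succ = {nt: [...] for nt in nts}: iterating the set nts in key order is exact — the dict is only looked up afterwards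
  let succ : PySem.Dict String (List String) :=
    nts.foldl (fun d nt => d.insert nt (pvNtSuccessors g nts nt)) PySem.Dict.empty
  let safe := pvSafeLoop nts succ (nts.length + 1) PySem.Set.empty
  if g.contains symbol = false then []
  else
    let recursive := PySem.Set.diff nts safe
    ((PySem.List.enumerate (g.getD symbol [])).filter
      (fun p => p.2.all (fun t => PySem.Set.contains recursive t))).map (fun p => p.1)

-- ===== PRECONDITION & SPEC =====
def Spec_calculate_non_recursive_productions (symbol : String) (grammar : List (String × List (List String))) (out : List Int) : Prop := out = calculate_non_recursive_productions_alt symbol grammar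
instance (symbol : String) (grammar : List (String × List (List String))) (out : List Int) : Decidable (Spec_calculate_non_recursive_productions symbol grammar out) := by unfold Spec_calculate_non_recursive_productions; infer_instance

-- ===== CLAIM (what is proved, stated in full; the proofs are below) =====
def Claim_equal_calculate_non_recursive_productions : Prop := ∀ (symbol : String) (grammar : List (String × List (List String))), Dom_calculate_non_recursive_productions symbol grammar → Spec_calculate_non_recursive_productions symbol grammar (calculate_non_recursive_productions symbol grammar)

-- ===== LEMMAS AND PROOFS =====

-- The grammar graph: an edge from a to the non-terminal tokens occurring in a's rules.
def pvE (g : PySem.Dict String (List (List String))) (a b : String) : Prop :=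
  b ∈ (g.getD a ([] : List (List String))).flatMap (fun rule => rule) ∧ b ∈ g.keys

-- "there is a walk of exactly k edges starting at a"
def pvHasWalk (g : PySem.Dict String (List (List String))) : Nat → String → Prop
  | 0, _ => True
  | k + 1, a => ∃ b, pvE g a b ∧ pvHasWalk g k b

theorem pvHasWalk_succ_imp (g : PySem.Dict String (List (List String))) :
    ∀ (k : Nat) (a : String), pvHasWalk g (k + 1) a → pvHasWalk g k a := by
  intro k
  induction k with
  | zero => intro a _; trivial
  | succ k ih =>
    intro a h
    obtain ⟨b, he, hw⟩ := h
    exact ⟨b, he, ih b hw⟩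

theorem pvHasWalk_mono (g : PySem.Dict String (List (List String))) {j k : Nat} (h : j ≤ k)
    (a : String) : pvHasWalk g k a → pvHasWalk g j a := by
  intro hw
  obtain ⟨d, rfl⟩ : ∃ d, k = j + d := ⟨k - j, by omega⟩
  clear h
  induction d with
  | zero => exact hw
  | succ d ih => exact ih (pvHasWalk_succ_imp g (j + d) a hw)

theorem pvWalk_extend (g : PySem.Dict String (List (List String))) {a b : String}
    (h : Relation.ReflTransGen (pvE g) a b) {k : Nat} (hw : pvHasWalk g k b) :
    ∃ k', k ≤ k' ∧ pvHasWalk g k' a := by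
  induction h using Relation.ReflTransGen.head_induction_on with
  | refl => exact ⟨k, le_refl _, hw⟩
  | head h1 _ ih =>
    obtain ⟨k', hk, hw'⟩ := ih
    exact ⟨k' + 1, by omega, ⟨_, h1, hw'⟩⟩

theorem pvPump (g : PySem.Dict String (List (List String))) {nt t : String}
    (he : pvE g nt t) (hr : Relation.ReflTransGen (pvE g) t nt) (k : Nat) :
    pvHasWalk g k nt := by
  have S : ∀ k, ∃ k', k ≤ k' ∧ pvHasWalk g k' nt := by
    intro k
    induction k with
    | zero => exact ⟨0, le_refl _, trivial⟩
    | succ k ih =>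
      obtain ⟨k', hk, hw⟩ := ih
      obtain ⟨k'', hk', hw'⟩ := pvWalk_extend g hr hw
      exact ⟨k'' + 1, by omega, ⟨t, he, hw'⟩⟩
  obtain ⟨k', hk, hw⟩ := S k
  exact pvHasWalk_mono g hk nt hw

-- soundness of the DFS: a True result means a walk back into the current path or a reachable cycle
theorem pvIsRec_sound (g : PySem.Dict String (List (List String))) :
    ∀ (fuel : Nat) (P : PySem.Set String) (nt : String),
      pvIsRec g (PySem.Set.ofList g.keys) fuel nt P = true →
      (∃ v ∈ P, Relation.ReflTransGen (pvE g) nt v) ∨ (∀ k, pvHasWalk g k nt) := by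
  intro fuel
  induction fuel with
  | zero =>
    intro P nt h
    rw [pvIsRec] at h
    exact Or.inl ⟨nt, (PySem.Set.contains_iff _ _).mp h, Relation.ReflTransGen.refl⟩
  | succ f ih =>
    intro P nt h
    by_cases hc : PySem.Set.contains P nt = true
    · exact Or.inl ⟨nt, (PySem.Set.contains_iff _ _).mp hc, Relation.ReflTransGen.refl⟩
    · rw [pvIsRec, if_neg hc] at h
      obtain ⟨rule, hrule, hr⟩ := List.any_eq_true.mp h
      obtain ⟨token, htok, hb⟩ := List.any_eq_true.mp hr
      rw [Bool.and_eq_true] at hb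
      obtain ⟨h1, h2⟩ := hb
      have htk : token ∈ g.keys := (PySem.Set.mem_ofList _ _).mp ((PySem.Set.contains_iff _ _).mp h1)
      have hedge : pvE g nt token := ⟨List.mem_flatMap.mpr ⟨rule, hrule, htok⟩, htk⟩
      rcases ih (PySem.Set.add P nt) token h2 with ⟨v, hv, hreach⟩ | hall
      · rcases (PySem.Set.mem_add _ _ _).mp hv with hvP | hveq
        · exact Or.inl ⟨v, hvP, Relation.ReflTransGen.head hedge hreach⟩
        · subst hveq
          exact Or.inr (pvPump g hedge hreach)
      · refine Or.inr (fun k => ?_)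
        cases k with
        | zero => trivial
        | succ k => exact ⟨token, hedge, hall k⟩

-- completeness: with enough fuel a False result bounds every walk from nt
theorem pvIsRec_complete (g : PySem.Dict String (List (List String))) (hk : g.keys.Nodup) :
    ∀ (fuel : Nat) (P : PySem.Set String) (nt : String), P.Nodup → nt ∈ g.keys →
      pvIsRec g (PySem.Set.ofList g.keys) fuel nt P = false →
      (g.keys.filter (fun x => !(PySem.Set.contains P x))).length ≤ fuel →
      ¬ pvHasWalk g ((g.keys.filter (fun x => !(PySem.Set.contains P x))).length) nt := by
  intro fuel
  induction fuel with
  | zero =>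
    intro P nt _ hmem hfalse hle
    rw [pvIsRec] at hfalse
    have h1 : nt ∈ g.keys.filter (fun x => !(PySem.Set.contains P x)) :=
      List.mem_filter.mpr ⟨hmem, by rw [hfalse]; rfl⟩
    have := List.length_pos_of_mem h1
    intro _
    omega
  | succ f ih =>
    intro P nt hnd hmem hfalse hle hwalk
    have hntP : PySem.Set.contains P nt = false := by
      cases hcase : PySem.Set.contains P nt with
      | false => rfl
      | true =>
        rw [pvIsRec, if_pos hcase] at hfalse
        exact Bool.noConfusion hfalse
    have hcne : ¬ PySem.Set.contains P nt = true := fun hh => by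
      rw [hntP] at hh; exact Bool.noConfusion hh
    rw [pvIsRec, if_neg hcne] at hfalse
    have hntP' : nt ∉ P := fun hm =>
      Bool.noConfusion (((PySem.Set.contains_iff _ _).mpr hm).symm.trans hntP)
    have h1 : nt ∈ g.keys.filter (fun x => !(PySem.Set.contains P x)) :=
      List.mem_filter.mpr ⟨hmem, by rw [hntP]; rfl⟩
    set c := (g.keys.filter (fun x => !(PySem.Set.contains P x))).length with hcdef
    have hcpos : 0 < c := List.length_pos_of_mem h1
    have hw' : pvHasWalk g ((c - 1) + 1) nt := by
      rw [show c - 1 + 1 = c from by omega]; exact hwalk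
    obtain ⟨b, hE, hw⟩ := hw'
    obtain ⟨hflat, hbkeys⟩ := hE
    obtain ⟨rule, hrule, htok⟩ := List.mem_flatMap.mp hflat
    have hrule2 : (rule.any fun token =>
        (PySem.Set.ofList g.keys).contains token &&
          pvIsRec g (PySem.Set.ofList g.keys) f token (PySem.Set.add P nt)) = false := by
      cases hcase : (rule.any fun token =>
          (PySem.Set.ofList g.keys).contains token &&
            pvIsRec g (PySem.Set.ofList g.keys) f token (PySem.Set.add P nt)) with
      | false => rfl
      | true =>
        rw [List.any_eq_true] at hcase
        have := List.any_eq_false.mp hfalse rule hrule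
        exact absurd ((List.any_eq_true).mpr hcase) this
    have htokf := List.any_eq_false.mp hrule2 b htok
    have hbk : (PySem.Set.ofList g.keys).contains b = true :=
      (PySem.Set.contains_iff _ _).mpr ((PySem.Set.mem_ofList _ _).mpr hbkeys)
    have hbrec : pvIsRec g (PySem.Set.ofList g.keys) f b (PySem.Set.add P nt) = false := by
      cases hcase : pvIsRec g (PySem.Set.ofList g.keys) f b (PySem.Set.add P nt) with
      | false => rfl
      | true =>
        have : ((PySem.Set.ofList g.keys).contains b &&
            pvIsRec g (PySem.Set.ofList g.keys) f b (PySem.Set.add P nt)) = true := by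
          rw [hbk, hcase]; rfl
        exact absurd this htokf
    have hadd : PySem.Set.add P nt = P ++ [nt] := PySem.Set.add_of_not_mem hntP'
    have hnd' : (PySem.Set.add P nt).Nodup := by
      rw [hadd]
      simp [List.nodup_append, hnd]
      exact fun a ha h => hntP' (h ▸ ha)
    -- the unvisited count drops by exactly one
    have hfilt : g.keys.filter (fun x => !(PySem.Set.contains (PySem.Set.add P nt) x)) =
        (g.keys.filter (fun x => !(PySem.Set.contains P x))).filter (fun x => !(x == nt)) := by
      rw [List.filter_filter]
      apply List.filter_congr
      intro x _
      by_cases hxnt : x = nt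
      · subst hxnt
        have hxin : x ∈ PySem.Set.add P x := by
          rw [hadd]; exact List.mem_append_right _ (by simp)
        rw [(PySem.Set.contains_iff _ _).mpr hxin]
        simp
      · have hb2 : (x == nt) = false := beq_eq_false_iff_ne.mpr hxnt
        have hcadd : PySem.Set.contains (PySem.Set.add P nt) x = PySem.Set.contains P x := by
          by_cases hxP : x ∈ P
          · rw [(PySem.Set.contains_iff _ _).mpr hxP,
              (PySem.Set.contains_iff _ _).mpr
                (show x ∈ PySem.Set.add P nt by rw [hadd]; exact List.mem_append_left _ hxP)]
          · have hna : x ∉ PySem.Set.add P nt := by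
              rw [hadd]
              intro hmm
              rcases List.mem_append.mp hmm with h3 | h3
              · exact hxP h3
              · exact hxnt (by simpa using h3)
            have hf2 : PySem.Set.contains (PySem.Set.add P nt) x = false := by
              cases hcase : PySem.Set.contains (PySem.Set.add P nt) x with
              | false => rfl
              | true => exact absurd ((PySem.Set.contains_iff _ _).mp hcase) hna
            have hf3 : PySem.Set.contains P x = false := by
              cases hcase : PySem.Set.contains P x with
              | false => rfl
              | true => exact absurd ((PySem.Set.contains_iff _ _).mp hcase) hxP
            rw [hf2, hf3]
        rw [hcadd, hb2]
        cases PySem.Set.contains P x <;> rfl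
    have hLnd : (g.keys.filter (fun x => !(PySem.Set.contains P x))).Nodup := hk.filter _
    have hbeq : (g.keys.filter (fun x => !(PySem.Set.contains P x))).filter
        (fun x => !(x == nt)) =
        (g.keys.filter (fun x => !(PySem.Set.contains P x))).erase nt := by
      rw [List.Nodup.erase_eq_filter hLnd nt]
      apply List.filter_congr
      intro x _
      simp [bne]
    have hlen : (g.keys.filter (fun x =>
        !(PySem.Set.contains (PySem.Set.add P nt) x))).length = c - 1 := by
      rw [hfilt, hbeq, List.length_erase_of_mem h1]
    have hres := ih (PySem.Set.add P nt) b hnd' hbkeys hbrec (by omega)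
    rw [hlen] at hres
    exact hres hw

theorem pvKeysLen (g : PySem.Dict String (List (List String))) : g.size = g.keys.length := by
  simp [PySem.Dict.size, PySem.Dict.keys]

theorem pvFilterEmpty (g : PySem.Dict String (List (List String))) :
    g.keys.filter (fun x => !(PySem.Set.contains (PySem.Set.empty : PySem.Set String) x)) =
      g.keys := by
  apply List.filter_eq_self.mpr
  intro x _
  rfl

theorem pvIsRec_iff (g : PySem.Dict String (List (List String))) (hk : g.keys.Nodup)
    {nt : String} (h : nt ∈ g.keys) :
    pvIsRec g (PySem.Set.ofList g.keys) (g.size + 1) nt PySem.Set.empty = true ↔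
      pvHasWalk g g.keys.length nt := by
  constructor
  · intro htrue
    rcases pvIsRec_sound g _ _ _ htrue with ⟨v, hv, _⟩ | hall
    · simp [PySem.Set.empty] at hv
    · exact hall _
  · intro hw
    by_contra hfalse
    have hfalse' : pvIsRec g (PySem.Set.ofList g.keys) (g.size + 1) nt PySem.Set.empty = false := by
      cases hcase : pvIsRec g (PySem.Set.ofList g.keys) (g.size + 1) nt PySem.Set.empty with
      | false => rfl
      | true => exact absurd hcase hfalse
    have hle : (g.keys.filter (fun x =>
        !(PySem.Set.contains (PySem.Set.empty : PySem.Set String) x))).length ≤ g.size + 1 := by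
      rw [pvFilterEmpty, pvKeysLen]
      omega
    have hres := pvIsRec_complete g hk (g.size + 1) PySem.Set.empty nt List.nodup_nil h hfalse' hle
    rw [pvFilterEmpty] at hres
    exact hres hw

-- membership in A's accumulated recursive set
theorem pvFindRec_mem (g : PySem.Dict String (List (List String))) (hk : g.keys.Nodup)
    (x : String) :
    x ∈ (pvFindRecNonRec g).1 ↔ x ∈ g.keys ∧ pvHasWalk g g.keys.length x := by
  have hfold : ∀ (l : List String) (p : PySem.Set String × PySem.Set String),
      x ∈ (l.foldl (fun (pr : PySem.Set String × PySem.Set String) nt =>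
        if pvIsRec g (PySem.Set.ofList g.keys) (g.size + 1) nt PySem.Set.empty then
          (PySem.Set.add pr.1 nt, pr.2)
        else (pr.1, PySem.Set.add pr.2 nt)) p).1 ↔
      x ∈ p.1 ∨ (x ∈ l ∧
        pvIsRec g (PySem.Set.ofList g.keys) (g.size + 1) x PySem.Set.empty = true) := by
    intro l
    induction l with
    | nil =>
      intro p
      rw [List.foldl_nil]
      constructor
      · exact fun h => Or.inl h
      · rintro (h | ⟨h1, _⟩)
        · exact h
        · exact absurd h1 (by simp)
    | cons a l ihl =>
      intro p
      rw [List.foldl_cons, ihl]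
      by_cases ha : pvIsRec g (PySem.Set.ofList g.keys) (g.size + 1) a PySem.Set.empty = true
      · rw [if_pos ha]
        constructor
        · rintro (h | ⟨h1, h2⟩)
          · rcases (PySem.Set.mem_add _ _ _).mp h with h' | h'
            · exact Or.inl h'
            · subst h'
              exact Or.inr ⟨by simp, ha⟩
          · exact Or.inr ⟨List.mem_cons_of_mem a h1, h2⟩
        · rintro (h | ⟨h1, h2⟩)
          · exact Or.inl ((PySem.Set.mem_add _ _ _).mpr (Or.inl h))
          · rcases List.mem_cons.mp h1 with h' | h'
            · exact Or.inl ((PySem.Set.mem_add _ _ _).mpr (Or.inr h'))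
            · exact Or.inr ⟨h', h2⟩
      · rw [if_neg ha]
        constructor
        · rintro (h | ⟨h1, h2⟩)
          · exact Or.inl h
          · exact Or.inr ⟨List.mem_cons_of_mem a h1, h2⟩
        · rintro (h | ⟨h1, h2⟩)
          · exact Or.inl h
          · rcases List.mem_cons.mp h1 with h' | h'
            · subst h'
              exact absurd h2 ha
            · exact Or.inr ⟨h', h2⟩
  unfold pvFindRecNonRec
  simp only []
  rw [hfold]
  constructor
  · rintro (h | ⟨h1, h2⟩)
    · exact absurd h (by simp [PySem.Set.empty])
    · have h1' : x ∈ g.keys := (PySem.Set.mem_ofList _ _).mp h1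
      exact ⟨h1', (pvIsRec_iff g hk h1').mp h2⟩
  · rintro ⟨h1, h2⟩
    exact Or.inr ⟨(PySem.Set.mem_ofList _ _).mpr h1, (pvIsRec_iff g hk h1).mpr h2⟩

-- the entries of B's succ dict
theorem pvSuccD (g : PySem.Dict String (List (List String))) (hk : g.keys.Nodup) :
    ∀ nt ∈ g.keys,
      ((PySem.Set.ofList g.keys).foldl
        (fun d nt => d.insert nt (pvNtSuccessors g (PySem.Set.ofList g.keys) nt))
        PySem.Dict.empty).getD nt [] = pvNtSuccessors g (PySem.Set.ofList g.keys) nt := by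
  intro nt hnt
  rw [PySem.Set.ofList_eq_self_of_nodup _ hk]
  have hfresh : ∀ a ∈ g.keys, (PySem.Dict.empty : PySem.Dict String (List String)).contains
      ((fun a => a) a) = false := fun a _ => PySem.Dict.contains_empty a
  have hmapnd : (g.keys.map (fun a => a)).Nodup := by simpa using hk
  have hitems := PySem.Dict.items_foldl_insert_fresh g.keys (fun a => a)
    (fun a => pvNtSuccessors g g.keys a) PySem.Dict.empty hfresh hmapnd
  have hnd2 : (g.keys.foldl
      (fun d nt => d.insert nt (pvNtSuccessors g g.keys nt)) PySem.Dict.empty).keys.Nodup :=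
    PySem.Dict.nodup_keys_foldl_insert g.keys (fun _ x => pvNtSuccessors g g.keys x)
      PySem.Dict.empty (by simp [PySem.Dict.keys_empty])
  refine PySem.Dict.getD_of_mem_items _ ?_ hnd2 []
  rw [hitems]
  exact List.mem_append_right _ (List.mem_map.mpr ⟨nt, hnt, rfl⟩)

-- one round of B's loop: the filter condition is exactly "all successors safe"
theorem pvStepMem0 (g : PySem.Dict String (List (List String)))
    (succd : PySem.Dict String (List String))
    (hsd : ∀ nt ∈ g.keys, succd.getD nt [] = pvNtSuccessors g (PySem.Set.ofList g.keys) nt)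
    (S : PySem.Set String) (x : String) :
    x ∈ (PySem.Set.ofList g.keys).filter
        (fun nt => (succd.getD nt []).all (fun t => PySem.Set.contains S t)) ↔
      x ∈ g.keys ∧ ∀ t, pvE g x t → t ∈ S := by
  rw [List.mem_filter]
  constructor
  · rintro ⟨h1, h2⟩
    have hx : x ∈ g.keys := (PySem.Set.mem_ofList _ _).mp h1
    refine ⟨hx, ?_⟩
    intro t hE
    rw [hsd x hx] at h2
    have ht : t ∈ pvNtSuccessors g (PySem.Set.ofList g.keys) x :=
      List.mem_filter.mpr ⟨hE.1,
        (PySem.Set.contains_iff _ _).mpr ((PySem.Set.mem_ofList _ _).mpr hE.2)⟩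
    exact (PySem.Set.contains_iff _ _).mp (List.all_eq_true.mp h2 t ht)
  · rintro ⟨hx, hall⟩
    refine ⟨(PySem.Set.mem_ofList _ _).mpr hx, ?_⟩
    rw [hsd x hx]
    apply List.all_eq_true.mpr
    intro t ht
    have ht' := List.mem_filter.mp ht
    have hE : pvE g x t :=
      ⟨ht'.1, (PySem.Set.mem_ofList _ _).mp ((PySem.Set.contains_iff _ _).mp ht'.2)⟩
    exact (PySem.Set.contains_iff _ _).mpr (hall t hE)

-- a non-terminal with a walk of full length has walks of every length
theorem pvWalk_all (g : PySem.Dict String (List (List String))) (hk : g.keys.Nodup)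
    {x : String} (hxk : x ∈ g.keys) (hw : pvHasWalk g g.keys.length x) :
    ∀ m, pvHasWalk g m x := by
  have htrue := (pvIsRec_iff g hk hxk).mpr hw
  rcases pvIsRec_sound g _ _ _ htrue with ⟨v, hv, _⟩ | hall
  · exact absurd hv (by simp [PySem.Set.empty])
  · exact hall

-- B's loop, run with enough fuel from a level-k stage, returns the full fixpoint
theorem pvLoop_mem (g : PySem.Dict String (List (List String))) (hk : g.keys.Nodup)
    (succd : PySem.Dict String (List String))
    (hsd : ∀ nt ∈ g.keys, succd.getD nt [] = pvNtSuccessors g (PySem.Set.ofList g.keys) nt) :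
    ∀ (fuel k : Nat) (S : PySem.Set String), S.Nodup →
      (∀ y, y ∈ S ↔ y ∈ g.keys ∧ ¬ pvHasWalk g k y) →
      g.keys.length + 1 ≤ fuel + S.length →
      ∀ x, x ∈ pvSafeLoop (PySem.Set.ofList g.keys) succd fuel S ↔
        x ∈ g.keys ∧ ¬ pvHasWalk g g.keys.length x := by
  intro fuel
  induction fuel with
  | zero =>
    intro k S hnd hchar hfuel x
    have hsubK : S ⊆ g.keys := fun y hy => ((hchar y).mp hy).1
    have hlen := (List.subperm_of_subset hnd hsubK).length_le
    omega
  | succ f ihf =>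
    intro k S hnd hchar hfuel x
    rw [pvSafeLoop]
    have hcharNew : ∀ y, y ∈ (PySem.Set.ofList g.keys).filter
        (fun nt => (succd.getD nt []).all (fun t => PySem.Set.contains S t)) ↔
        y ∈ g.keys ∧ ¬ pvHasWalk g (k + 1) y := by
      intro y
      rw [pvStepMem0 g succd hsd S y]
      constructor
      · rintro ⟨hy, hall⟩
        refine ⟨hy, ?_⟩
        rintro ⟨b, hE, hw⟩
        exact ((hchar b).mp (hall b hE)).2 hw
      · rintro ⟨hy, hnw⟩
        exact ⟨hy, fun t hE => (hchar t).mpr ⟨hE.2, fun hw => hnw ⟨t, hE, hw⟩⟩⟩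
    have hsub : S ⊆ (PySem.Set.ofList g.keys).filter
        (fun nt => (succd.getD nt []).all (fun t => PySem.Set.contains S t)) := by
      intro y hy
      obtain ⟨hyk, hnw⟩ := (hchar y).mp hy
      exact (hcharNew y).mpr ⟨hyk, fun hw => hnw (pvHasWalk_succ_imp g k y hw)⟩
    by_cases he : PySem.Set.equal ((PySem.Set.ofList g.keys).filter
        (fun nt => (succd.getD nt []).all (fun t => PySem.Set.contains S t))) S = true
    · rw [if_pos he]
      constructor
      · intro hx
        obtain ⟨hxk, hnw⟩ := (hchar x).mp hx
        exact ⟨hxk, fun hw => hnw (pvWalk_all g hk hxk hw k)⟩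
      · rintro ⟨hxk, hnw⟩
        have Q : ∀ (m : Nat) (y : String), y ∈ g.keys → ¬ pvHasWalk g m y → y ∈ S := by
          intro m
          induction m with
          | zero => intro y _ hny; exact absurd trivial hny
          | succ m ihm =>
            intro y hyk hny
            have hynew : y ∈ (PySem.Set.ofList g.keys).filter
                (fun nt => (succd.getD nt []).all (fun t => PySem.Set.contains S t)) :=
              (pvStepMem0 g succd hsd S y).mpr
                ⟨hyk, fun t hE => ihm t hE.2 (fun hw => hny ⟨t, hE, hw⟩)⟩
            exact ((PySem.Set.equal_iff _ _).mp he y).mp hynew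
        exact Q g.keys.length x hxk hnw
    · rw [if_neg he]
      have hndNew : ((PySem.Set.ofList g.keys).filter
          (fun nt => (succd.getD nt []).all (fun t => PySem.Set.contains S t))).Nodup :=
        (PySem.Set.nodup_ofList _).filter _
      have hx0 : ∃ y, y ∈ (PySem.Set.ofList g.keys).filter
          (fun nt => (succd.getD nt []).all (fun t => PySem.Set.contains S t)) ∧ y ∉ S := by
        by_contra hno
        exact he ((PySem.Set.equal_iff _ _).mpr (fun y =>
          ⟨fun hy => Classical.byContradiction (fun hns => hno ⟨y, hy, hns⟩),
           fun hy => hsub hy⟩))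
      obtain ⟨x0, hx0new, hx0S⟩ := hx0
      have hsub' : S ⊆ ((PySem.Set.ofList g.keys).filter
          (fun nt => (succd.getD nt []).all (fun t => PySem.Set.contains S t))).erase x0 :=
        fun y hy => (List.mem_erase_of_ne (fun h => hx0S (by rw [← h]; exact hy))).mpr (hsub hy)
      have hlen := (List.subperm_of_subset hnd hsub').length_le
      rw [List.length_erase_of_mem hx0new] at hlen
      have hpos := List.length_pos_of_mem hx0new
      exact ihf (k + 1) _ hndNew hcharNew (by omega) x

-- ===== VERDICT (by name: the statement is the Claim_ definition above) =====
theorem calculate_non_recursive_productions_spec :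
    Claim_equal_calculate_non_recursive_productions := by
  intro symbol grammar _
  unfold Spec_calculate_non_recursive_productions
  simp only [calculate_non_recursive_productions, calculate_non_recursive_productions_alt]
  set g := PySem.Dict.ofList grammar with hg
  have hk : g.keys.Nodup := by rw [hg]; exact PySem.Dict.nodup_keys_ofList grammar
  set succd := (PySem.Set.ofList g.keys).foldl
    (fun d nt => d.insert nt (pvNtSuccessors g (PySem.Set.ofList g.keys) nt))
    PySem.Dict.empty with hsuccd
  have hsd : ∀ nt ∈ g.keys, succd.getD nt [] =
      pvNtSuccessors g (PySem.Set.ofList g.keys) nt := by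
    rw [hsuccd]; exact pvSuccD g hk
  by_cases hc : g.contains symbol = false
  · simp only [if_pos hc]
  · simp only [if_neg hc]
    have hnlen : (PySem.Set.ofList g.keys).length = g.keys.length := by
      rw [PySem.Set.ofList_eq_self_of_nodup _ hk]
    have hloop := pvLoop_mem g hk succd hsd ((PySem.Set.ofList g.keys).length + 1) 0
      PySem.Set.empty List.nodup_nil
      (fun y => by simp [PySem.Set.empty, pvHasWalk])
      (by rw [hnlen]; simp)
    have htok : ∀ t : String,
        PySem.Set.contains (pvFindRecNonRec g).1 t =
        PySem.Set.contains (PySem.Set.diff (PySem.Set.ofList g.keys)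
          (pvSafeLoop (PySem.Set.ofList g.keys) succd ((PySem.Set.ofList g.keys).length + 1)
            PySem.Set.empty)) t := by
      intro t
      have hiff : t ∈ (pvFindRecNonRec g).1 ↔
          t ∈ PySem.Set.diff (PySem.Set.ofList g.keys)
            (pvSafeLoop (PySem.Set.ofList g.keys) succd ((PySem.Set.ofList g.keys).length + 1)
              PySem.Set.empty) := by
        rw [pvFindRec_mem g hk, PySem.Set.mem_diff, PySem.Set.mem_ofList]
        constructor
        · rintro ⟨h1, h2⟩
          exact ⟨h1, fun h3 => ((hloop t).mp h3).2 h2⟩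
        · rintro ⟨h1, h2⟩
          refine ⟨h1, ?_⟩
          by_contra h3
          exact h2 ((hloop t).mpr ⟨h1, h3⟩)
      cases hA : PySem.Set.contains (pvFindRecNonRec g).1 t with
      | true =>
        exact ((PySem.Set.contains_iff _ _).mpr
          (hiff.mp ((PySem.Set.contains_iff _ _).mp hA))).symm
      | false =>
        cases hB : PySem.Set.contains (PySem.Set.diff (PySem.Set.ofList g.keys)
            (pvSafeLoop (PySem.Set.ofList g.keys) succd ((PySem.Set.ofList g.keys).length + 1)
              PySem.Set.empty)) t with
        | false => rfl
        | true =>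
          have := (PySem.Set.contains_iff _ _).mpr (hiff.mpr ((PySem.Set.contains_iff _ _).mp hB))
          rw [hA] at this
          exact Bool.noConfusion this
    rw [PySem.List.foldl_append_if
      (fun p : Int × List String =>
        p.2.all (fun token => PySem.Set.contains (pvFindRecNonRec g).1 token))
      (fun p : Int × List String => p.1)]
    rw [List.nil_append]
    congr 1
    apply List.filter_congr
    intro p _
    exact List.all_congr rfl (fun t => htok t)
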